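-- pv_equiv track=rewrite | github.com/clan-lol/clan-core | pkgs/clan-cli/clan_lib/machines/suggestions.py | _suggest_similar_names
-- ===== SOURCE A (Python) =====
-- def _levenshtein_distance(s1: str, s2: str) -> int:
--     """Calculate the Levenshtein distance between two strings."""
--     if len(s1) < len(s2):
--         return _levenshtein_distance(s2, s1)
--
--     if len(s2) == 0:
--         return len(s1)
--
--     previous_row = list(range(len(s2) + 1))
--     for i, c1 in enumerate(s1):
--         current_row = [i + 1]
--         for j, c2 in enumerate(s2):
--             insertions = previous_row[j + 1] + 1
--             deletions = current_row[j] + 1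
--             substitutions = previous_row[j] + (c1 != c2)
--             current_row.append(min(insertions, deletions, substitutions))
--         previous_row = current_row
--
--     return previous_row[-1]
--
-- def _suggest_similar_names(
--     target: str,
--     candidates: list[str],
--     max_suggestions: int = 3,
-- ) -> list[str]:
--     if not candidates:
--         return []
--
--     distances = [
--         (candidate, _levenshtein_distance(target.lower(), candidate.lower()))
--         for candidate in candidates
--     ]
--
--     distances.sort(key=lambda x: (x[1], x[0]))
--
--     return [candidate for candidate, _ in distances[:max_suggestions]]
-- ===== SOURCE B (Python) =====
-- def _edit_distance(s1: str, s2: str) -> int: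
--     """Levenshtein distance, computed top-down over index pairs with memoization."""
--     memo: dict = {}
--     memo_get = memo.get
--
--     def d(i: int, j: int) -> int:
--         if i == 0:
--             return j
--         if j == 0:
--             return i
--         key = (i, j)
--         hit = memo_get(key)
--         if hit is not None:
--             return hit
--         cost = 0 if s1[i - 1] == s2[j - 1] else 1
--         res = min(d(i - 1, j) + 1, d(i, j - 1) + 1, d(i - 1, j - 1) + cost)
--         memo[key] = res
--         return res
--
--     return d(len(s1), len(s2))
--
--
-- def _suggest_similar_names(
--     target: str,
--     candidates: list[str],
--     max_suggestions: int = 3,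
-- ) -> list[str]:
--     if not candidates:
--         return []
--     tl = target.lower()
--     distances = [(c, _edit_distance(tl, c.lower())) for c in candidates]
--     distances.sort(key=lambda x: (x[1], x[0]))
--     return [c for c, _ in distances[:max_suggestions]]
-- ===== Notes on version B (the rewrite author's own statement) =====
-- stated objective: alternative
-- what changed: The Levenshtein distance is recomputed top-down: a recursive function over index pairs (i, j) with an explicit memo dict replaces A's bottom-up rolling-row dynamic program (the candidate scoring and the (distance, name) sort are kept).
import Mathlib
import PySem

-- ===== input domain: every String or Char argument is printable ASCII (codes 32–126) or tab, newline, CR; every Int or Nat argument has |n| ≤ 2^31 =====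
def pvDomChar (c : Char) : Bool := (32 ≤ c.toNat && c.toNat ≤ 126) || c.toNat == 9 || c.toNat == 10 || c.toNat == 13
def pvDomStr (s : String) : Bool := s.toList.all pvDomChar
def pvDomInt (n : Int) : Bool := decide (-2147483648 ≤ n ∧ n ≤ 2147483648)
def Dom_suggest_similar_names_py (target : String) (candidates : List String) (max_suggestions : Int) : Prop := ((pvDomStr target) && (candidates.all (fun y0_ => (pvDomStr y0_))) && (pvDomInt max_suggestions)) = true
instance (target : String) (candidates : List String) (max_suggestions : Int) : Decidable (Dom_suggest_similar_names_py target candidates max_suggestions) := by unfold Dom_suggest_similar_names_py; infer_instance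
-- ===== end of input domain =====

-- B re-implements the Levenshtein distance as a top-down memoized recursion over index
-- pairs instead of A's bottom-up rolling-row DP (objective: alternative, same asymptotic cost).

-- ===== PORT A =====
-- _levenshtein_distance, on the char lists of its two string arguments.
-- previous_row[j+1] / current_row[j] / previous_row[-1] are ported as pyGet? · |>.getD 0;
-- the indices are always in range here, so the default 0 is never taken.
def lev_rows_py (s1 s2 : List Char) : Int :=
  if h : s1.length < s2.length then lev_rows_py s2 s1
  else if s2.length = 0 then (s1.length : Int)
  else
    let previous_row :=
      (PySem.List.enumerate s1 0).foldl
        (fun previous_row ic =>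
          (PySem.List.enumerate s2 0).foldl
            (fun current_row jc =>
              let insertions := (PySem.List.pyGet? previous_row (jc.1 + 1)).getD 0 + 1
              let deletions := (PySem.List.pyGet? current_row jc.1).getD 0 + 1
              let substitutions := (PySem.List.pyGet? previous_row jc.1).getD 0 +
                (if ic.2 ≠ jc.2 then 1 else 0)
              current_row ++ [min insertions (min deletions substitutions)])
            [ic.1 + 1])
        (PySem.List.pyRange 0 ((s2.length : Int) + 1) 1)
    (PySem.List.pyGet? previous_row (-1)).getD 0
termination_by s2.length
decreasing_by exact h

def suggest_similar_names_py (target : String) (candidates : List String) (max_suggestions : Int) : List String :=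
  if candidates = [] then []
  else
    let distances := candidates.map (fun c =>
      (c, lev_rows_py (PySem.Str.lower target).toList (PySem.Str.lower c).toList))
    let distances := PySem.List.sorted2 distances (fun x => x.2) (fun x => x.1)
    (PySem.List.slice distances none (some max_suggestions)).map (fun x => x.1)

-- ===== PORT B =====
-- _edit_distance's inner d(i, j), threading the memo dict explicitly;
-- s1[i-1] / s2[j-1] are ported as pyGet? · |>.getD ' ' (always in range here).
def lev_memo_py (s1 s2 : List Char) : (i j : Nat) → PySem.Dict (Int × Int) Int → Int × PySem.Dict (Int × Int) Int
  | 0, j, memo => ((j : Int), memo)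
  | i+1, 0, memo => ((i : Int) + 1, memo)
  | i+1, j+1, memo =>
    match PySem.Dict.get? memo ((i : Int) + 1, (j : Int) + 1) with
    | some hit => (hit, memo)
    | none =>
      let cost : Int :=
        if (PySem.List.pyGet? s1 (i : Int)).getD ' ' = (PySem.List.pyGet? s2 (j : Int)).getD ' '
        then 0 else 1
      let r1 := lev_memo_py s1 s2 i (j+1) memo
      let r2 := lev_memo_py s1 s2 (i+1) j r1.2
      let r3 := lev_memo_py s1 s2 i j r2.2
      let res := min (r1.1 + 1) (min (r2.1 + 1) (r3.1 + cost))
      (res, PySem.Dict.insert r3.2 ((i : Int) + 1, (j : Int) + 1) res)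
termination_by i j => i + j

def lev_topdown_py (s1 s2 : List Char) : Int :=
  (lev_memo_py s1 s2 s1.length s2.length PySem.Dict.empty).1

def suggest_similar_names_py_alt (target : String) (candidates : List String) (max_suggestions : Int) : List String :=
  if candidates = [] then []
  else
    let tl := PySem.Str.lower target
    let distances := candidates.map (fun c =>
      (c, lev_topdown_py tl.toList (PySem.Str.lower c).toList))
    let distances := PySem.List.sorted2 distances (fun x => x.2) (fun x => x.1)
    (PySem.List.slice distances none (some max_suggestions)).map (fun x => x.1)

-- ===== PRECONDITION & SPEC =====
def Spec_suggest_similar_names_py (target : String) (candidates : List String) (max_suggestions : Int) (out : List String) : Prop := out = suggest_similar_names_py_alt target candidates max_suggestions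
instance (target : String) (candidates : List String) (max_suggestions : Int) (out : List String) : Decidable (Spec_suggest_similar_names_py target candidates max_suggestions out) := by unfold Spec_suggest_similar_names_py; infer_instance

-- ===== CLAIM (what is proved, stated in full; the proofs are below) =====
def Claim_equal_suggest_similar_names_py : Prop := ∀ (target : String) (candidates : List String) (max_suggestions : Int), Dom_suggest_similar_names_py target candidates max_suggestions → Spec_suggest_similar_names_py target candidates max_suggestions (suggest_similar_names_py target candidates max_suggestions)

-- ===== LEMMAS AND PROOFS =====

def levSpec (s1 s2 : List Char) : Nat → Nat → Int
  | 0, j => (j : Int)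
  | i+1, 0 => (i : Int) + 1
  | i+1, j+1 =>
    let cost : Int :=
      if (PySem.List.pyGet? s1 (i : Int)).getD ' ' = (PySem.List.pyGet? s2 (j : Int)).getD ' '
      then 0 else 1
    min (levSpec s1 s2 i (j+1) + 1) (min (levSpec s1 s2 (i+1) j + 1) (levSpec s1 s2 i j + cost))
termination_by i j => i + j

theorem levSpec_zero_right (s1 s2 : List Char) (i : Nat) : levSpec s1 s2 i 0 = (i : Int) := by
  cases i <;> simp [levSpec]

-- the inner-loop body of A's port, previous_row and c1 as parameters
def innerF (prev : List Int) (c1 : Char) (current_row : List Int) (jc : Int × Char) : List Int :=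
  let insertions := (PySem.List.pyGet? prev (jc.1 + 1)).getD 0 + 1
  let deletions := (PySem.List.pyGet? current_row jc.1).getD 0 + 1
  let substitutions := (PySem.List.pyGet? prev jc.1).getD 0 + (if c1 ≠ jc.2 then 1 else 0)
  current_row ++ [min insertions (min deletions substitutions)]

theorem inner_spec (x y : List Char) (i : Nat) (hi : i < x.length) :
    ∀ (ys : List Char) (j0 : Nat), ys = y.drop j0 → j0 ≤ y.length →
    (PySem.List.enumerate ys (j0 : Int)).foldl (innerF ((List.range (y.length+1)).map (fun j => levSpec x y i j)) x[i])
      ((List.range (j0+1)).map (fun j => levSpec x y (i+1) j))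
    = (List.range (y.length+1)).map (fun j => levSpec x y (i+1) j) := by
  intro ys
  induction ys with
  | nil =>
    intro j0 hdrop hle
    have : j0 = y.length := by
      have := congrArg List.length hdrop
      simp [List.length_drop] at this
      omega
    subst this
    simp [PySem.List.enumerate]
  | cons c ys ihy =>
    intro j0 hdrop hle
    have hj0 : j0 < y.length := by
      have := congrArg List.length hdrop
      simp [List.length_drop] at this
      omega
    have hc : c = y[j0] := by
      have := congrArg (fun l => l[0]?) hdrop
      simp [List.getElem?_drop, List.getElem?_eq_getElem hj0] at this
      exact this
    have hys : ys = y.drop (j0+1) := by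
      have := congrArg List.tail hdrop
      simpa [List.tail_drop] using this
    rw [PySem.List.enumerate_cons, List.foldl_cons]
    have hstep : innerF ((List.range (y.length+1)).map (fun j => levSpec x y i j)) x[i]
        ((List.range (j0+1)).map (fun j => levSpec x y (i+1) j)) ((j0 : Int), c)
        = (List.range (j0+1+1)).map (fun j => levSpec x y (i+1) j) := by
      unfold innerF
      have e1 : ((j0:Int) + 1) = (((j0+1 : Nat)) : Int) := by push_cast; ring
      rw [e1]
      rw [PySem.List.pyGet?_natCast, PySem.List.pyGet?_natCast, PySem.List.pyGet?_natCast]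
      rw [List.getElem?_map, List.getElem?_map, List.getElem?_map]
      rw [List.getElem?_range (by omega : j0 + 1 < y.length + 1),
          List.getElem?_range (by omega : j0 < j0 + 1),
          List.getElem?_range (by omega : j0 < y.length + 1)]
      simp only [Option.map_some, Option.getD_some]
      have hcost : (if x[i] ≠ c then (1:Int) else 0)
          = (if (PySem.List.pyGet? x (i : Int)).getD ' ' = (PySem.List.pyGet? y (j0 : Int)).getD ' ' then 0 else 1) := by
        rw [PySem.List.pyGet?_natCast, PySem.List.pyGet?_natCast,
            List.getElem?_eq_getElem hi, List.getElem?_eq_getElem hj0]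
        simp only [Option.getD_some, hc]
        by_cases hxy : x[i] = y[j0] <;> simp [hxy]
      rw [hcost]
      rw [List.range_succ (n := j0+1), List.map_append]
      congr 1
      simp only [List.map_cons, List.map_nil, List.cons.injEq, and_true]
      rw [levSpec]
    rw [hstep]
    have : ((j0:Int) + 1) = (((j0+1 : Nat)) : Int) := by push_cast; ring
    rw [this]
    exact ihy (j0+1) hys (by omega)

theorem outer_spec (x y : List Char) :
    ∀ (xs : List Char) (i0 : Nat), xs = x.drop i0 → i0 ≤ x.length →
    (PySem.List.enumerate xs (i0 : Int)).foldl
      (fun previous_row ic => (PySem.List.enumerate y 0).foldl (innerF previous_row ic.2) [ic.1 + 1])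
      ((List.range (y.length+1)).map (fun j => levSpec x y i0 j))
    = (List.range (y.length+1)).map (fun j => levSpec x y x.length j) := by
  intro xs
  induction xs with
  | nil =>
    intro i0 hdrop hle
    have : i0 = x.length := by
      have := congrArg List.length hdrop; simp [List.length_drop] at this; omega
    subst this
    simp [PySem.List.enumerate]
  | cons c xs ihx =>
    intro i0 hdrop hle
    have hi0 : i0 < x.length := by
      have := congrArg List.length hdrop; simp [List.length_drop] at this; omega
    have hc : c = x[i0] := by
      have := congrArg (fun l => l[0]?) hdrop
      simp [List.getElem?_drop, List.getElem?_eq_getElem hi0] at this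
      exact this
    have hxs : xs = x.drop (i0+1) := by
      have := congrArg List.tail hdrop
      simpa [List.tail_drop] using this
    rw [PySem.List.enumerate_cons, List.foldl_cons]
    have hinit : [((i0:Int) + 1)] = (List.range (0+1)).map (fun j => levSpec x y (i0+1) j) := by
      simp [levSpec_zero_right]
    have hstep :
        (PySem.List.enumerate y 0).foldl
          (innerF ((List.range (y.length+1)).map (fun j => levSpec x y i0 j)) c) [((i0:Int)) + 1]
        = (List.range (y.length+1)).map (fun j => levSpec x y (i0+1) j) := by
      rw [hinit, hc]
      have h0 : (0 : Int) = ((0 : Nat) : Int) := rfl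
      rw [h0]
      exact inner_spec x y i0 hi0 y 0 (by simp) (by omega)
    rw [hstep]
    have : ((i0:Int) + 1) = (((i0+1 : Nat)) : Int) := by push_cast; ring
    rw [this]
    exact ihx (i0+1) hxs (by omega)

theorem lev_rows_direct (x y : List Char) (h : ¬ x.length < y.length) :
    lev_rows_py x y = levSpec x y x.length y.length := by
  rw [lev_rows_py, dif_neg h]
  by_cases hm : y.length = 0
  · rw [if_pos hm, hm, levSpec_zero_right]
  · rw [if_neg hm]
    have hrange : PySem.List.pyRange 0 ((y.length : Int) + 1) 1
        = (List.range (y.length+1)).map (fun j => levSpec x y 0 j) := by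
      have := PySem.List.pyRange_zero_natCast (y.length + 1)
      push_cast at this
      rw [this]
      exact List.map_congr_left (fun k _ => by simp [levSpec])
    have hfold :
        (PySem.List.enumerate x 0).foldl
          (fun previous_row ic => (PySem.List.enumerate y 0).foldl (innerF previous_row ic.2) [ic.1 + 1])
          ((List.range (y.length+1)).map (fun j => levSpec x y 0 j))
        = (List.range (y.length+1)).map (fun j => levSpec x y x.length j) := by
      have h0 : (0 : Int) = ((0 : Nat) : Int) := rfl
      rw [h0]
      exact outer_spec x y x 0 (by simp) (by omega)
    show (PySem.List.pyGet? _ (-1)).getD 0 = _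
    rw [hrange]
    rw [show (fun (previous_row : List Int) (ic : Int × Char) =>
          (PySem.List.enumerate y 0).foldl
            (fun current_row jc =>
              let insertions := (PySem.List.pyGet? previous_row (jc.1 + 1)).getD 0 + 1
              let deletions := (PySem.List.pyGet? current_row jc.1).getD 0 + 1
              let substitutions := (PySem.List.pyGet? previous_row jc.1).getD 0 +
                (if ic.2 ≠ jc.2 then 1 else 0)
              current_row ++ [min insertions (min deletions substitutions)])
            [ic.1 + 1])
        = (fun previous_row ic => (PySem.List.enumerate y 0).foldl (innerF previous_row ic.2) [ic.1 + 1])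
      from rfl]
    rw [hfold]
    rw [PySem.List.pyGet?_neg_one]
    rw [List.range_succ, List.map_append]
    simp

theorem levSpec_symm (s1 s2 : List Char) (i j : Nat) : levSpec s1 s2 i j = levSpec s2 s1 j i := by
  induction hn : i + j using Nat.strong_induction_on generalizing i j with
  | _ n ih =>
    subst hn
    match i, j with
    | 0, 0 => simp [levSpec]
    | 0, j+1 => simp [levSpec]
    | i+1, 0 => simp [levSpec]
    | i+1, j+1 =>
      rw [levSpec, levSpec]
      rw [ih (i + (j+1)) (by omega) i (j+1) rfl,
          ih ((i+1) + j) (by omega) (i+1) j rfl,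
          ih (i + j) (by omega) i j rfl]
      by_cases hc : (PySem.List.pyGet? s1 (i : Int)).getD ' ' = (PySem.List.pyGet? s2 (j : Int)).getD ' '
      · rw [if_pos hc, if_pos hc.symm]; omega
      · rw [if_neg hc, if_neg (fun h => hc h.symm)]; omega

theorem lev_rows_eq (s1 s2 : List Char) :
    lev_rows_py s1 s2 = levSpec s1 s2 s1.length s2.length := by
  by_cases h : s1.length < s2.length
  · rw [lev_rows_py, dif_pos h]
    rw [lev_rows_direct s2 s1 (by omega), levSpec_symm]
  · exact lev_rows_direct s1 s2 h

def MemoOK (s1 s2 : List Char) (memo : PySem.Dict (Int × Int) Int) : Prop :=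
  ∀ p v, memo.get? p = some v → ∃ a b : Nat, p = ((a : Int), (b : Int)) ∧ v = levSpec s1 s2 a b

theorem lev_memo_py_spec (s1 s2 : List Char) (i j : Nat) (memo : PySem.Dict (Int × Int) Int)
    (h : MemoOK s1 s2 memo) :
    (lev_memo_py s1 s2 i j memo).1 = levSpec s1 s2 i j ∧ MemoOK s1 s2 (lev_memo_py s1 s2 i j memo).2 := by
  induction hn : i + j using Nat.strong_induction_on generalizing i j memo with
  | _ n ih =>
    subst hn
    match i, j with
    | 0, j => exact ⟨by simp [lev_memo_py, levSpec], by simpa [lev_memo_py] using h⟩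
    | i+1, 0 => exact ⟨by simp [lev_memo_py, levSpec], by simpa [lev_memo_py] using h⟩
    | i+1, j+1 =>
      rw [lev_memo_py]
      cases hget : PySem.Dict.get? memo ((i : Int) + 1, (j : Int) + 1) with
      | some hit =>
        obtain ⟨a, b, hp, hv⟩ := h _ _ hget
        obtain ⟨ha, hb⟩ : (a : Int) = (i : Int) + 1 ∧ (b : Int) = (j : Int) + 1 := by
          have := hp; simp [Prod.ext_iff] at this; exact ⟨this.1.symm, this.2.symm⟩
        have ha' : a = i + 1 := by omega
        have hb' : b = j + 1 := by omega
        subst ha' hb'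
        exact ⟨by simp [hv], h⟩
      | none =>
        have h1 := ih (i + (j+1)) (by omega) i (j+1) memo h rfl
        have h2 := ih ((i+1) + j) (by omega) (i+1) j _ h1.2 rfl
        have h3 := ih (i + j) (by omega) i j _ h2.2 rfl
        refine ⟨?_, ?_⟩
        · simp only [h1.1, h2.1, h3.1]
          rw [levSpec]
        · intro p v hpv
          rw [PySem.Dict.get?_insert] at hpv
          split at hpv
          · rename_i heq
            refine ⟨i+1, j+1, by rw [heq]; push_cast; rfl, ?_⟩
            simp only [Option.some.injEq] at hpv
            rw [← hpv, h1.1, h2.1, h3.1, levSpec]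
          · exact h3.2 _ _ hpv

theorem lev_topdown_eq (s1 s2 : List Char) :
    lev_topdown_py s1 s2 = levSpec s1 s2 s1.length s2.length := by
  have h := lev_memo_py_spec s1 s2 s1.length s2.length PySem.Dict.empty
    (fun p v hv => by simp [PySem.Dict.get?_empty] at hv)
  simpa [lev_topdown_py] using h.1

theorem lev_eq (s1 s2 : List Char) : lev_rows_py s1 s2 = lev_topdown_py s1 s2 := by
  rw [lev_rows_eq, lev_topdown_eq]

-- ===== VERDICT (by name: the statement is the Claim_ definition above) =====
theorem suggest_similar_names_py_spec : Claim_equal_suggest_similar_names_py := by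
  intro target candidates max_suggestions _
  unfold Spec_suggest_similar_names_py suggest_similar_names_py suggest_similar_names_py_alt
  simp only [lev_eq]
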